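-- pv_equiv track=rewrite | github.com/bala-subramanian-k-grl/code-parsing-sruthy-task | check_code_quality.py | _check_code_smells
-- ===== SOURCE A (Python) =====
-- from typing import Dict, List, Tuple
--
-- def _check_code_smells(content: str, lines: List[str]) -> int:
--     """Check for code smells."""
--     smells = 0
--
--     # Long lines (>79 chars)
--     for line in lines:
--         if len(line) > 79 and not line.strip().startswith("#"):
--             smells += 1
--
--     # Too many blank lines
--     blank_count = 0
--     for line in lines:
--         if not line.strip():
--             blank_count += 1
--             if blank_count > 2:
--                 smells += 1
--         else:
--             blank_count = 0
--
--     return smells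
-- ===== SOURCE B (Python) =====
-- from typing import Dict, List, Tuple
--
-- def _check_code_smells(content: str, lines: List[str]) -> int:
--     """Count long lines, plus blank-run excess computed from gaps between non-blank line indices."""
--     long_count = sum(1 for line in lines
--                      if len(line) > 79 and not line.strip().startswith("#"))
--     nonblank = [i for i, line in enumerate(lines) if line.strip()]
--     bounds = [-1] + nonblank + [len(lines)]
--     excess = sum(max(0, (b - a - 1) - 2) for a, b in zip(bounds, bounds[1:]))
--     return long_count + excess
-- ===== Notes on version B (the rewrite author's own statement) =====
-- stated objective: alternative
-- what changed: Replaces the running blank-line counter with per-run arithmetic: B collects the indices of non-blank lines and adds max(0, L-2) for each gap of L consecutive blank lines between them, and counts long lines with a single sum over a comprehension.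
import Mathlib
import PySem

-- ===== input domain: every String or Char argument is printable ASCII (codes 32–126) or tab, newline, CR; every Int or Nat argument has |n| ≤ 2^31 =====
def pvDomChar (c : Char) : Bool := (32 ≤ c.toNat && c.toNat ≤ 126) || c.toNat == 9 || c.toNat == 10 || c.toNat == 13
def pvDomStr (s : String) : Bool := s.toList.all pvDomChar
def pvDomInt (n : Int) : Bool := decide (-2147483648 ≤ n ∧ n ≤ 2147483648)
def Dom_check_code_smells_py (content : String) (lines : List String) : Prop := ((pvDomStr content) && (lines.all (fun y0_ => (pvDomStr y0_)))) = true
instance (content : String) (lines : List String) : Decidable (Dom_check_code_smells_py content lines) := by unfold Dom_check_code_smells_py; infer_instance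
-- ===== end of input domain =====

-- B replaces A's running blank-line counter with per-run arithmetic on the gaps between
-- non-blank line indices (max (0, L-2) per gap of L blanks); same O(n) cost, alternative structure.

-- ===== PORT A =====
-- the long-line / comment predicate shared verbatim by both Pythons
def pvSmellLine (line : String) : Bool :=
  decide (PySem.Str.len line > 79) && !(PySem.Str.startswith (PySem.Str.strip line) "#")

def check_code_smells_py (_content : String) (lines : List String) : Int :=
  -- for line in lines: if len(line) > 79 and not line.strip().startswith("#"): smells += 1
  let smells : Int := lines.foldl (fun smells line => if pvSmellLine line then smells + 1 else smells) 0
  -- blank_count loop; state = (smells, blank_count)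
  let st : Int × Int := lines.foldl (fun (st : Int × Int) line =>
    if PySem.Str.strip line = "" then
      let bc := st.2 + 1
      (if bc > 2 then st.1 + 1 else st.1, bc)
    else (st.1, 0)) (smells, 0)
  st.1

-- ===== PORT B =====
def check_code_smells_py_alt (_content : String) (lines : List String) : Int :=
  let long_count : Int := (lines.countP pvSmellLine : Nat)
  let nonblank : List Int :=
    ((PySem.List.enumerate lines).filter (fun p => ¬ (PySem.Str.strip p.2 = ""))).map (·.1)
  let bounds : List Int := -1 :: (nonblank ++ [(lines.length : Int)])
  let excess : Int := (bounds.zip bounds.tail).foldl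
    (fun s p => s + max 0 ((p.2 - p.1 - 1) - 2)) 0
  long_count + excess

-- ===== PRECONDITION & SPEC =====
def Spec_check_code_smells_py (content : String) (lines : List String) (out : Int) : Prop := out = check_code_smells_py_alt content lines
instance (content : String) (lines : List String) (out : Int) : Decidable (Spec_check_code_smells_py content lines out) := by unfold Spec_check_code_smells_py; infer_instance

-- ===== CLAIM (what is proved, stated in full; the proofs are below) =====
def Claim_equal_check_code_smells_py : Prop := ∀ (content : String) (lines : List String), Dom_check_code_smells_py content lines → Spec_check_code_smells_py content lines (check_code_smells_py content lines)

-- ===== LEMMAS AND PROOFS =====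

-- sum of max(0, gap-3) over consecutive pairs of a bounds list
def pvGapsSum (bs : List Int) : Int :=
  ((bs.zip bs.tail).map (fun p => max 0 ((p.2 - p.1 - 1) - 2))).sum

def pvIdxs (k : Int) (ls : List String) : List Int :=
  ((PySem.List.enumerate ls k).filter (fun p => ¬ (PySem.Str.strip p.2 = ""))).map (·.1)

def pvG (a k : Int) (ls : List String) : Int :=
  pvGapsSum (a :: (pvIdxs k ls ++ [k + ls.length]))

theorem pvGapsSum_cons_cons (a b : Int) (rest : List Int) :
    pvGapsSum (a :: b :: rest) = max 0 ((b - a - 1) - 2) + pvGapsSum (b :: rest) := by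
  simp [pvGapsSum]

theorem pvIdxs_cons_blank (k : Int) (l : String) (ls : List String)
    (h : PySem.Str.strip l = "") : pvIdxs k (l :: ls) = pvIdxs (k + 1) ls := by
  simp [pvIdxs, PySem.List.enumerate_cons, h]

theorem pvIdxs_cons_nonblank (k : Int) (l : String) (ls : List String)
    (h : ¬ PySem.Str.strip l = "") : pvIdxs k (l :: ls) = k :: pvIdxs (k + 1) ls := by
  simp [pvIdxs, PySem.List.enumerate_cons, h]

-- the blank-count loop of A, from state (s, bc), equals s + pvG (k-1-bc) k ls - max 0 (bc-2)
theorem pvBlankLoop (ls : List String) : ∀ (s bc k : Int), 0 ≤ bc →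
    (ls.foldl (fun (st : Int × Int) line =>
      if PySem.Str.strip line = "" then
        let bc := st.2 + 1
        (if bc > 2 then st.1 + 1 else st.1, bc)
      else (st.1, 0)) (s, bc)).1
    = s + pvG (k - 1 - bc) k ls - max 0 (bc - 2) := by
  induction ls with
  | nil =>
    intro s bc k hbc
    simp only [List.foldl_nil, pvG, pvIdxs, PySem.List.enumerate_nil,
      List.filter_nil, List.map_nil, List.nil_append, List.length_nil]
    simp [pvGapsSum]
    omega
  | cons l ls ih =>
    intro s bc k hbc
    by_cases h : PySem.Str.strip l = ""
    · simp only [List.foldl_cons, h, if_true]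
      have := ih (if bc + 1 > 2 then s + 1 else s) (bc + 1) (k + 1) (by omega)
      simp only [this]
      have hG : pvG (k - 1 - bc) k (l :: ls) = pvG (k - 1 - bc) (k + 1) ls := by
        simp only [pvG, pvIdxs_cons_blank k l ls h, List.length_cons]
        push_cast
        have : k + ((ls.length : Int) + 1) = k + 1 + ↑ls.length := by ring
        rw [this]
      have harg : k + 1 - 1 - (bc + 1) = k - 1 - bc := by ring
      rw [harg, ← hG]
      split_ifs <;> omega
    · simp only [List.foldl_cons, h, if_false]
      have := ih s 0 (k + 1) (by omega)
      simp only [this]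
      have hG : pvG (k - 1 - bc) k (l :: ls)
          = max 0 ((k - (k - 1 - bc) - 1) - 2) + pvG k (k + 1) ls := by
        simp only [pvG, pvIdxs_cons_nonblank k l ls h, List.length_cons, List.cons_append]
        rw [pvGapsSum_cons_cons]
        push_cast
        have : k + ((ls.length : Int) + 1) = k + 1 + ↑ls.length := by ring
        rw [this]
      have harg : k + 1 - 1 - (0 : Int) = k := by ring
      rw [harg, hG]
      omega

theorem pvLongLoop (ls : List String) (s : Int) :
    ls.foldl (fun smells line => if pvSmellLine line then smells + 1 else smells) s
    = s + (ls.countP pvSmellLine : Nat) := by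
  induction ls generalizing s with
  | nil => simp
  | cons l ls ih =>
    by_cases h : pvSmellLine l
    · simp [List.foldl_cons, h, ih]
      ring
    · simp [List.foldl_cons, h, ih]

theorem pvFoldlAdd (f : Int × Int → Int) (l : List (Int × Int)) : ∀ (s0 : Int),
    l.foldl (fun s p => s + f p) s0 = s0 + (l.map f).sum := by
  induction l with
  | nil => intro s0; simp
  | cons p l ih => intro s0; simp [List.foldl_cons, ih]; ring

theorem pvExcessFold (bounds : List Int) :
    (bounds.zip bounds.tail).foldl (fun s p => s + max 0 ((p.2 - p.1 - 1) - 2)) 0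
    = pvGapsSum bounds := by
  rw [pvFoldlAdd]
  simp [pvGapsSum]

-- ===== VERDICT (by name: the statement is the Claim_ definition above) =====
theorem check_code_smells_py_spec : Claim_equal_check_code_smells_py := by
  intro content lines _
  unfold Spec_check_code_smells_py check_code_smells_py check_code_smells_py_alt
  dsimp only
  rw [pvLongLoop, pvExcessFold]
  rw [pvBlankLoop lines _ 0 0 le_rfl]
  have h1 : pvG (0 - 1 - 0) 0 lines = pvGapsSum (-1 :: (pvIdxs 0 lines ++ [(lines.length : Int)])) := by
    norm_num [pvG]
  rw [h1]
  simp only [pvIdxs]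
  omega
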